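-- pv_equiv track=rewrite | github.com/pypi-data/pypi-mirror-284 | packages/simple-semantic-search/simple_semantic_search-0.1.0-py3-none-any.whl/simple_semantic_search/__init__.py | get_extended_neighbors
-- ===== SOURCE A (Python) =====
-- def get_extended_neighbors(word_graph, word, max_depth):
--     neighbors = {}
--     queue = [(word, 0)]
--
--     while queue:
--         current_word, depth = queue.pop(0)
--         if depth > max_depth or current_word in neighbors:
--             continue
--
--         neighbors[current_word] = depth
--         if current_word in word_graph:
--             for neighbor in word_graph[current_word]:
--                 queue.append((neighbor, depth + 1))
--
--     return neighbors
-- ===== SOURCE B (Python) =====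
-- def get_extended_neighbors(word_graph, word, max_depth):
--     # Level-synchronous BFS: depth is the loop counter, one frontier list per level.
--     neighbors = {}
--     frontier = [word]
--     depth = 0
--     while frontier and depth <= max_depth:
--         next_frontier = []
--         for w in frontier:
--             if w in neighbors:
--                 continue
--             neighbors[w] = depth
--             if w in word_graph:
--                 next_frontier.extend(word_graph[w])
--         frontier = next_frontier
--         depth += 1
--     return neighbors
-- ===== Notes on version B (the rewrite author's own statement) =====
-- stated objective: alternative
-- what changed: The single flat queue of (word, depth) pairs is replaced by level-synchronous BFS: a per-level frontier list of words with the depth kept as the loop counter, processed one whole level per outer iteration.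
import Mathlib
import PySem

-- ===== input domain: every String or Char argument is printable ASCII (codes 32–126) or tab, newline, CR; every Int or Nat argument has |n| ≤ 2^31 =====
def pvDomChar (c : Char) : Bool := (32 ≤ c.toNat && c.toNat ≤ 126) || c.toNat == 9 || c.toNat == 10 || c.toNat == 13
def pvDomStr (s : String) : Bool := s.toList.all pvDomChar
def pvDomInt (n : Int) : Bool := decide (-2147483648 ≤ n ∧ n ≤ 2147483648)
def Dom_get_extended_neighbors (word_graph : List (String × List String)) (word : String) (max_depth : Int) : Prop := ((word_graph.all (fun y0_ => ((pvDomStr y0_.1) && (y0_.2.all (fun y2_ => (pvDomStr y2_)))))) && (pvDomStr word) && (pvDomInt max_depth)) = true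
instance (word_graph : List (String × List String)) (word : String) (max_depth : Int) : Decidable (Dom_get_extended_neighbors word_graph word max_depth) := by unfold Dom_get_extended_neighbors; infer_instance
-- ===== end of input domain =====

-- B replaces A's flat (word, depth) queue by level-synchronous BFS (frontier list per level,
-- depth as loop counter); same return value, objective: alternative decomposition.

-- ===== PORT A =====
-- dict lookup: first matching key (Python dict has unique keys)
def gLookup (g : List (String × List String)) (w : String) : Option (List String) :=
  (g.find? (fun p => p.1 == w)).map (·.2)

-- termination helpers for A's while loop (cited by name in decreasing_by)
theorem pvFilterLenLe {α : Type} (p q : α → Bool) (l : List α)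
    (himp : ∀ x ∈ l, q x = true → p x = true) :
    (l.filter q).length ≤ (l.filter p).length := by
  induction l with
  | nil => simp
  | cons a l ih =>
    have ih' := ih (fun x hx => himp x (List.mem_cons_of_mem _ hx))
    by_cases hq : q a = true
    · have hp := himp a (List.mem_cons_self) hq
      simp [hq, hp]; omega
    · simp only [Bool.not_eq_true] at hq
      by_cases hp : p a = true <;> simp [hq, hp] <;> omega

theorem pvFilterLenLt {α : Type} (p q : α → Bool) (l : List α)
    (himp : ∀ x ∈ l, q x = true → p x = true)
    (x0 : α) (hx0 : x0 ∈ l) (hp0 : p x0 = true) (hq0 : q x0 = false) :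
    (l.filter q).length < (l.filter p).length := by
  induction l with
  | nil => simp at hx0
  | cons a l ih =>
    have hle := pvFilterLenLe p q l (fun x hx => himp x (List.mem_cons_of_mem _ hx))
    rcases List.mem_cons.mp hx0 with h | h
    · subst h
      simp [hp0, hq0]; omega
    · have ih' := ih (fun x hx => himp x (List.mem_cons_of_mem _ hx)) h
      by_cases hq : q a = true
      · have hp := himp a (List.mem_cons_self) hq
        simp [hq, hp]; omega
      · simp only [Bool.not_eq_true] at hq
        by_cases hp : p a = true <;> simp [hq, hp] <;> omega

-- A's while loop: pop from the front; record-before-expand; skip on depth or repeat.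
def loopA (g : List (String × List String)) (md : Int)
    (n : List (String × Int)) (queue : List (String × Int)) : List (String × Int) :=
  match queue with
  | [] => n
  | (w, d) :: rest =>
    if md < d || n.any (fun p => p.1 == w) then
      loopA g md n rest
    else
      loopA g md (n ++ [(w, d)])
        (rest ++ (match gLookup g w with
                  | some ns => ns.map (fun x => (x, d + 1))
                  | none => []))
termination_by ((g.filter (fun p => !(n.any (fun q => q.1 == p.1)))).length, queue.length)
decreasing_by
  · apply Prod.Lex.right; simp
  · rename_i h
    simp only [Bool.or_eq_true, not_or, Bool.not_eq_true, decide_eq_false_iff_not] at h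
    obtain ⟨_hd, hany⟩ := h
    have himp : ∀ p ∈ g,
        (!((n ++ [(w, d)]).any fun q => q.1 == p.1)) = true →
        (!(n.any fun q => q.1 == p.1)) = true := by
      intro p _ hq
      simp only [List.any_append, Bool.not_eq_true', Bool.or_eq_false_iff] at hq ⊢
      exact hq.1
    rcases hg : gLookup g w with _ | ns
    · -- w is not a key of g: the filter is unchanged, queue shrinks
      have hfn : g.find? (fun p => p.1 == w) = none := by
        rcases hf : g.find? (fun p => p.1 == w) with _ | p0
        · exact hf
        · simp [gLookup, hf] at hg
      have hnone : ∀ p ∈ g, (p.1 == w) = false := by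
        intro p hp
        have := List.find?_eq_none.mp hfn p hp
        simpa using this
      have heq : (g.filter (fun p => !((n ++ [(w, d)]).any fun q => q.1 == p.1))).length
          = (g.filter (fun p => !(n.any fun q => q.1 == p.1))).length := by
        congr 1
        apply List.filter_congr
        intro p hp
        have hwp : (w == p.1) = false := by
          have : p.1 ≠ w := by simpa using hnone p hp
          simp [Ne.symm this]
        simp [List.any_append, hwp]
      rw [heq]
      apply Prod.Lex.right; simp
    · -- w is a key of g: the filter strictly shrinks
      apply Prod.Lex.left
      obtain ⟨p0, hfind⟩ : ∃ p0, g.find? (fun p => p.1 == w) = some p0 := by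
        rcases hf : g.find? (fun p => p.1 == w) with _ | p0
        · simp [gLookup, hf] at hg
        · exact ⟨p0, hf⟩
      have hp0mem : p0 ∈ g := List.mem_of_find?_eq_some hfind
      have hp0w : p0.1 = w := by
        have := List.find?_some hfind; simpa using this
      apply pvFilterLenLt _ _ _ himp p0 hp0mem
      · simp [hp0w, hany]
      · simp [List.any_append, hp0w]

def get_extended_neighbors (word_graph : List (String × List String)) (word : String) (max_depth : Int) : List (String × Int) :=
  loopA word_graph max_depth [] [(word, 0)]

-- ===== PORT B =====
-- one level: walk the frontier, recording fresh words at depth d and collecting next_frontier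
def stepLevel (g : List (String × List String)) (d : Int)
    (n : List (String × Int)) (frontier : List String) : List (String × Int) × List String :=
  match frontier with
  | [] => (n, [])
  | w :: rest =>
    if n.any (fun p => p.1 == w) then
      stepLevel g d n rest
    else
      let nf := match gLookup g w with
                | some ns => ns
                | none => []
      let r := stepLevel g d (n ++ [(w, d)]) rest
      (r.1, nf ++ r.2)

-- B's outer loop: while frontier and depth <= max_depth
def loopB (g : List (String × List String)) (md : Int)
    (n : List (String × Int)) (frontier : List String) (depth : Int) : List (String × Int) :=
  if h : frontier.isEmpty || md < depth then n
  else
    let r := stepLevel g depth n frontier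
    loopB g md r.1 r.2 (depth + 1)
termination_by (md + 1 - depth).toNat
decreasing_by
  simp only [Bool.or_eq_true, not_or, decide_eq_true_eq, Bool.not_eq_true] at h
  omega

def get_extended_neighbors_alt (word_graph : List (String × List String)) (word : String) (max_depth : Int) : List (String × Int) :=
  loopB word_graph max_depth [] [word] 0

-- ===== PRECONDITION & SPEC =====
def Spec_get_extended_neighbors (word_graph : List (String × List String)) (word : String) (max_depth : Int) (out : List (String × Int)) : Prop := out = get_extended_neighbors_alt word_graph word max_depth
instance (word_graph : List (String × List String)) (word : String) (max_depth : Int) (out : List (String × Int)) : Decidable (Spec_get_extended_neighbors word_graph word max_depth out) := by unfold Spec_get_extended_neighbors; infer_instance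

-- ===== CLAIM (what is proved, stated in full; the proofs are below) =====
def Claim_equal_get_extended_neighbors : Prop := ∀ (word_graph : List (String × List String)) (word : String) (max_depth : Int), Dom_get_extended_neighbors word_graph word max_depth → Spec_get_extended_neighbors word_graph word max_depth (get_extended_neighbors word_graph word max_depth)

-- ===== LEMMAS AND PROOFS =====

-- every queued entry is too deep: A's loop drains the queue and changes nothing
theorem loopA_allDeep (g : List (String × List String)) (md : Int)
    (n : List (String × Int)) (queue : List (String × Int))
    (h : ∀ x ∈ queue, md < x.2) : loopA g md n queue = n := by
  induction queue with
  | nil => rw [loopA]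
  | cons x rest ih =>
    obtain ⟨w, d⟩ := x
    have hd : md < d := h (w, d) (List.mem_cons_self)
    rw [loopA]
    simp only [hd, decide_true, Bool.true_or, if_pos]
    exact ih (fun y hy => h y (List.mem_cons_of_mem _ hy))

-- level decomposition: running A's loop through one whole level (frontier at depth d,
-- pending already-collected depth-(d+1) words behind it) equals stepLevel then the rest
theorem loopA_level (g : List (String × List String)) (md : Int) (d : Int) (hd : ¬ md < d)
    (frontier : List String) :
    ∀ (pending : List String) (n : List (String × Int)),
    loopA g md n (frontier.map (fun w => (w, d)) ++ pending.map (fun w => (w, d + 1)))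
      = loopA g md (stepLevel g d n frontier).1
          ((pending ++ (stepLevel g d n frontier).2).map (fun w => (w, d + 1))) := by
  induction frontier with
  | nil => intro pending n; simp [stepLevel]
  | cons w rest ih =>
    intro pending n
    by_cases hany : n.any (fun p => p.1 == w) = true
    · rw [List.map_cons, List.cons_append, loopA]
      simp only [hd, if_pos, hany, Bool.or_true]
      rw [stepLevel, if_pos hany]
      exact ih pending n
    · rw [List.map_cons, List.cons_append, loopA]
      simp only [hd, hany, Bool.or_false, decide_false, if_neg, Bool.not_eq_true]
      rw [stepLevel, if_neg hany]
      rcases hg : gLookup g w with _ | ns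
      · have := ih pending (n ++ [(w, d)])
        simpa using this
      · rw [List.append_assoc, ← List.map_append]
        have := ih (pending ++ ns) (n ++ [(w, d)])
        simpa [List.append_assoc] using this

-- the bridge: A's loop on a single-depth frontier equals B's level loop
theorem loopA_eq_loopB (g : List (String × List String)) (md : Int) :
    ∀ (k : ℕ) (d : Int), k = (md + 1 - d).toNat →
    ∀ (frontier : List String) (n : List (String × Int)),
    loopA g md n (frontier.map (fun w => (w, d))) = loopB g md n frontier d := by
  intro k
  induction k with
  | zero =>
    intro d hk frontier n
    have hd : md < d := by omega
    rw [loopB, dif_pos (by simp [hd])]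
    refine loopA_allDeep g md n _ ?_
    intro x hx
    obtain ⟨a, _, rfl⟩ := List.mem_map.mp hx
    exact hd
  | succ k ih =>
    intro d hk frontier n
    by_cases hd : md < d
    · rw [loopB, dif_pos (by simp [hd])]
      refine loopA_allDeep g md n _ ?_
      intro x hx
      obtain ⟨a, _, rfl⟩ := List.mem_map.mp hx
      exact hd
    · rcases frontier with _ | ⟨w, rest⟩
      · rw [loopB, dif_pos (by simp)]
        simp only [List.map_nil]
        rw [loopA]
      · rw [loopB, dif_neg (by simp [hd])]
        have hlevel := loopA_level g md d hd (w :: rest) [] n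
        simp only [List.map_nil, List.append_nil, List.nil_append] at hlevel
        rw [hlevel]
        exact ih (d + 1) (by omega) _ _

-- ===== VERDICT (by name: the statement is the Claim_ definition above) =====
theorem get_extended_neighbors_spec : Claim_equal_get_extended_neighbors := by
  intro word_graph word max_depth _
  unfold Spec_get_extended_neighbors get_extended_neighbors get_extended_neighbors_alt
  have := loopA_eq_loopB word_graph max_depth ((max_depth + 1 - 0).toNat) 0 rfl [word] []
  simpa using this
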